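-- pv_equiv track=rewrite | github.com/pcchou1997/WeHelp | week-2/week-2.py | maxZeros
-- ===== SOURCE A (Python) =====
-- def maxZeros(nums):
--     contiZero = 0
--     contiZeroList = []
--     for i in nums:
--       if i == 0:
--         contiZero += 1;
--       else:
--         contiZero = 0;
--       contiZeroList.append(contiZero)
--     MaxContiZero = max(contiZeroList)
--     return MaxContiZero
-- ===== SOURCE B (Python) =====
-- def maxZeros(nums):
--     # boundary positions: virtual -1, every nonzero index, virtual len(nums);
--     # each zero run is the gap between two consecutive boundaries
--     boundaries = [-1] + [i for i, x in enumerate(nums) if x != 0] + [len(nums)]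
--     return max([b - a - 1 for a, b in zip(boundaries, boundaries[1:])])
-- ===== Notes on version B (the rewrite author's own statement) =====
-- stated objective: alternative
-- what changed: A keeps a per-element running counter and materialises a length-n list of all prefix run lengths before taking max; B computes the nonzero positions once and takes the max gap between consecutive boundaries (-1, nonzero indices, len), one entry per run.
-- outside the precondition, e.g. on maxZeros([]): A raises ValueError, B returns 0
import Mathlib
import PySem

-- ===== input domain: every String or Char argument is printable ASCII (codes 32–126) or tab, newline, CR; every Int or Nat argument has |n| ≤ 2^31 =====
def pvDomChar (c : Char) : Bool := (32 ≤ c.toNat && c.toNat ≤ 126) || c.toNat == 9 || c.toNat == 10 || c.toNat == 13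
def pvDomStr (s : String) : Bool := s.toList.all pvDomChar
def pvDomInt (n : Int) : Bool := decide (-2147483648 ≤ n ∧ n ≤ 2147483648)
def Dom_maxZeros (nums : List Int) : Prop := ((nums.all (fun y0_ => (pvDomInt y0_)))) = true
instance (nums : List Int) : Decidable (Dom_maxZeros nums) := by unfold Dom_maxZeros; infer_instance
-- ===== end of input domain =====

-- B replaces A's per-element running counter + length-n prefix-run list with a max over gaps
-- between consecutive boundaries (-1, nonzero indices, len): an alternative run-based algorithm
-- of the same cost; equivalence is about the return value (neither version mutates its argument).


-- ===== PORT A =====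
def maxZeros (nums : List Int) : Int :=
  (PySem.List.max?
    (nums.foldl
      (fun (s : Int × List Int) i =>
        let c : Int := if i = 0 then s.1 + 1 else 0
        (c, s.2 ++ [c]))
      ((0 : Int), ([] : List Int))).2
    (fun y => y)).getD 0

-- ===== PORT B =====
def maxZeros_alt (nums : List Int) : Int :=
  let boundaries : List Int :=
    [(-1 : Int)]
      ++ (PySem.List.enumerate nums).filterMap (fun p => if p.2 ≠ 0 then some p.1 else none)
      ++ [(nums.length : Int)]
  (PySem.List.max?
      (List.zipWith (fun a b => b - a - 1) boundaries (PySem.List.slice boundaries (some 1) none))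
      (fun y => y)).getD 0

-- ===== PRECONDITION & SPEC =====
-- Pre_ excludes only the empty list, on which Python's max([]) in A raises ValueError.
def Pre_maxZeros (nums : List Int) : Prop := nums ≠ []
instance (nums : List Int) : Decidable (Pre_maxZeros nums) := by unfold Pre_maxZeros; infer_instance
def pvWitness_maxZeros : List Int := [1, 0, 0, 5, 0]
def Spec_maxZeros (nums : List Int) (out : Int) : Prop := out = maxZeros_alt nums
instance (nums : List Int) (out : Int) : Decidable (Spec_maxZeros nums out) := by unfold Spec_maxZeros; infer_instance

-- ===== CLAIM (what is proved, stated in full; the proofs are below) =====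
def Claim_equal_maxZeros : Prop := ∀ (nums : List Int), Dom_maxZeros nums → Pre_maxZeros nums → Spec_maxZeros nums (maxZeros nums)

-- ===== LEMMAS AND PROOFS =====

-- A's prefix-run list, as a structural recursion (c = current run counter).
def pvScan (c : Int) : List Int → List Int
  | [] => []
  | x :: xs => let c' := if x = 0 then c + 1 else 0; c' :: pvScan c' xs

-- head and tail of B's gap list, as a structural recursion on nums.
def pvGp : List Int → Int × List Int
  | [] => (0, [])
  | x :: xs =>
      let ht := pvGp xs
      if x = 0 then (ht.1 + 1, ht.2) else (0, ht.1 :: ht.2)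

-- running max with identity 0
def pvK (l : List Int) : Int := l.foldl max 0

-- B's nonzero-position list, generalized over the enumeration start
def pvQ (xs : List Int) (s : Int) : List Int :=
  (PySem.List.enumerate xs s).filterMap (fun p => if p.2 ≠ 0 then some p.1 else none)

-- B's gap list of a boundary list
def pvZg (bs : List Int) : List Int := List.zipWith (fun a b => b - a - 1) bs bs.tail

theorem pvK_nonneg (l : List Int) : 0 ≤ pvK l :=
  (PySem.List.le_foldl_max l 0).1

theorem foldl_max_of_nonneg (l : List Int) : ∀ a : Int, 0 ≤ a → l.foldl max a = max a (pvK l) := by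
  induction l with
  | nil => intro a ha; simp [pvK]; omega
  | cons x t ih =>
      intro a ha
      have h1 := ih (max a x) (by omega)
      have h2 := ih (max 0 x) (by omega)
      simp only [List.foldl_cons, pvK] at *
      omega

theorem pvGp_head_nonneg (xs : List Int) : 0 ≤ (pvGp xs).1 := by
  induction xs with
  | nil => simp [pvGp]
  | cons x t ih =>
      by_cases h : x = 0
      · simp only [pvGp, h, if_true]
        omega
      · simp [pvGp, h]

theorem foldl_snd_eq_scan (nums : List Int) : ∀ (c : Int) (acc : List Int),
    (nums.foldl
      (fun (s : Int × List Int) i =>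
        let c : Int := if i = 0 then s.1 + 1 else 0
        (c, s.2 ++ [c]))
      (c, acc)).2 = acc ++ pvScan c nums := by
  induction nums with
  | nil => intro c acc; simp [pvScan]
  | cons x t ih =>
      intro c acc
      simp only [List.foldl_cons, pvScan]
      rw [ih]
      simp

-- the key invariant linking the two algorithms
theorem pvMain (xs : List Int) : ∀ c : Int, 0 ≤ c →
    max c (pvK (pvScan c xs)) = max (c + (pvGp xs).1) (pvK (pvGp xs).2) := by
  induction xs with
  | nil => intro c hc; simp [pvScan, pvGp, pvK]
  | cons x t ih =>
      intro c hc
      by_cases h : x = 0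
      · have hIH := ih (c + 1) (by omega)
        have hF := foldl_max_of_nonneg (pvScan (c + 1) t) (max 0 (c + 1)) (by omega)
        simp only [pvScan, pvGp, h, if_true, pvK, List.foldl_cons] at *
        omega
      · have hIH := ih 0 le_rfl
        have hh := pvGp_head_nonneg t
        have hF0 := foldl_max_of_nonneg (pvScan 0 t) (max 0 0) (by omega)
        have hFc := foldl_max_of_nonneg (pvGp t).2 (max 0 (pvGp t).1) (by omega)
        simp only [pvScan, pvGp, h, if_false, pvK, List.foldl_cons] at *
        omega

theorem pvZg_cons_cons (a b : Int) (l : List Int) : pvZg (a :: b :: l) = (b - a - 1) :: pvZg (b :: l) := rfl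

theorem pvZg_shift (bs : List Int) : pvZg (bs.map (· + 1)) = pvZg bs := by
  induction bs with
  | nil => rfl
  | cons x t ih =>
      cases t with
      | nil => rfl
      | cons y t' =>
          simp only [pvZg, List.map_cons, List.tail_cons, List.zipWith_cons_cons] at *
          rw [ih]
          norm_num

theorem pvQ_cons (x : Int) (xs : List Int) (s : Int) :
    pvQ (x :: xs) s = (if x = 0 then [] else [s]) ++ pvQ xs (s + 1) := by
  unfold pvQ
  rw [PySem.List.enumerate_cons, List.filterMap_cons]
  by_cases h : x = 0 <;> simp [h]

theorem pvQ_shift (xs : List Int) : ∀ s : Int, pvQ xs (s + 1) = (pvQ xs s).map (· + 1) := by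
  induction xs with
  | nil => intro s; simp [pvQ, PySem.List.enumerate_nil]
  | cons x t ih =>
      intro s
      rw [pvQ_cons, pvQ_cons, List.map_append, ih (s + 1)]
      by_cases h : x = 0 <;> simp [h]

theorem pvGaps_eq (nums : List Int) :
    pvZg ((-1 : Int) :: (pvQ nums 0 ++ [(nums.length : Int)])) = (pvGp nums).1 :: (pvGp nums).2 := by
  induction nums with
  | nil => simp [pvQ, PySem.List.enumerate_nil, pvZg, pvGp]
  | cons x t ih =>
      obtain ⟨y, L', hyL⟩ := List.exists_cons_of_ne_nil (show pvQ t 0 ++ [(t.length : Int)] ≠ [] by simp)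
      rw [hyL, pvZg_cons_cons, List.cons.injEq] at ih
      have hq1 : pvQ t (0 + 1) = (pvQ t 0).map (· + 1) := pvQ_shift t 0
      have hcast : (((x :: t).length : Nat) : Int) = (t.length : Int) + 1 := by
        push_cast [List.length_cons]; ring
      rw [pvQ_cons, hq1, hcast]
      by_cases h : x = 0
      · rw [if_pos h]
        rw [show (([] : List Int) ++ (pvQ t 0).map (· + 1)) ++ [(t.length : Int) + 1]
              = ((pvQ t 0) ++ [(t.length : Int)]).map (· + 1) by simp]
        rw [hyL, List.map_cons, pvZg_cons_cons,
            show ((y + 1) :: L'.map (· + 1)) = (y :: L').map (· + 1) from rfl, pvZg_shift]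
        simp only [pvGp, h, reduceIte, List.cons.injEq]
        exact ⟨by omega, ih.2⟩
      · rw [if_neg h]
        rw [show (([(0 : Int)]) ++ (pvQ t 0).map (· + 1)) ++ [(t.length : Int) + 1]
              = (0 : Int) :: ((pvQ t 0) ++ [(t.length : Int)]).map (· + 1) by simp]
        rw [pvZg_cons_cons]
        rw [show ((0 : Int) :: ((pvQ t 0) ++ [(t.length : Int)]).map (· + 1))
              = ((-1 : Int) :: (pvQ t 0 ++ [(t.length : Int)])).map (· + 1) by simp]
        rw [pvZg_shift, hyL, pvZg_cons_cons]
        simp only [pvGp, h, reduceIte, List.cons.injEq]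
        refine ⟨by norm_num, by omega, ih.2⟩

theorem maxZeros_char (x : Int) (xs : List Int) :
    maxZeros (x :: xs) = pvK (pvScan 0 (x :: xs)) := by
  unfold maxZeros
  rw [foldl_snd_eq_scan (x :: xs) 0 []]
  rw [List.nil_append]
  simp only [pvScan]
  rw [PySem.List.max?_id_cons, Option.getD_some]
  have h0 : (0 : Int) ≤ (if x = 0 then (0 : Int) + 1 else 0) := by split <;> omega
  simp only [pvK, List.foldl_cons]
  rw [max_eq_right h0]

theorem maxZeros_alt_char (nums : List Int) :
    maxZeros_alt nums = (pvGp nums).2.foldl max (pvGp nums).1 := by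
  unfold maxZeros_alt
  show (PySem.List.max?
      (List.zipWith (fun a b => b - a - 1)
        ([(-1 : Int)]
          ++ (PySem.List.enumerate nums).filterMap (fun p => if p.2 ≠ 0 then some p.1 else none)
          ++ [(nums.length : Int)])
        (PySem.List.slice
          ([(-1 : Int)]
            ++ (PySem.List.enumerate nums).filterMap (fun p => if p.2 ≠ 0 then some p.1 else none)
            ++ [(nums.length : Int)]) (some 1) none))
      (fun y => y)).getD 0 = _
  rw [PySem.List.slice_from_one]
  have hb : ([(-1 : Int)]
      ++ (PySem.List.enumerate nums).filterMap (fun p => if p.2 ≠ 0 then some p.1 else none)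
      ++ [(nums.length : Int)])
      = (-1 : Int) :: (pvQ nums 0 ++ [(nums.length : Int)]) := by
    simp [pvQ]
  rw [hb]
  rw [show (List.zipWith (fun a b => b - a - 1)
        ((-1 : Int) :: (pvQ nums 0 ++ [(nums.length : Int)]))
        ((-1 : Int) :: (pvQ nums 0 ++ [(nums.length : Int)])).tail)
      = pvZg ((-1 : Int) :: (pvQ nums 0 ++ [(nums.length : Int)])) from rfl]
  rw [pvGaps_eq, PySem.List.max?_id_cons, Option.getD_some]

theorem maxZeros_eq (nums : List Int) (hne : nums ≠ []) : maxZeros nums = maxZeros_alt nums := by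
  obtain ⟨x, xs, rfl⟩ := List.exists_cons_of_ne_nil hne
  rw [maxZeros_char, maxZeros_alt_char]
  have hmain := pvMain (x :: xs) 0 le_rfl
  have hh := pvGp_head_nonneg (x :: xs)
  have hf := foldl_max_of_nonneg (pvGp (x :: xs)).2 (pvGp (x :: xs)).1 hh
  have hk := pvK_nonneg (pvScan 0 (x :: xs))
  omega

-- ===== VERDICT (by name: the statement is the Claim_ definition above) =====
theorem maxZeros_spec : Claim_equal_maxZeros := by
  intro nums _ hpre
  unfold Spec_maxZeros
  exact maxZeros_eq nums hpre
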